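-- pv_equiv track=rewrite | github.com/miliar/Code_Jam_Webscraper | solutions_python/Problem_178/1115.py | minFlip
-- ===== SOURCE A (Python) =====
-- def minFlip(string):
-- 	count = 0
-- 	for i in range(0, len(string) - 1):
-- 		if string[i] != string[i + 1]:
-- 			count += 1
-- 	if string[-1] == '-':
-- 		count += 1
-- 	return count
-- ===== SOURCE B (Python) =====
-- def minFlip(string):
--     # Divide and conquer: transitions(s) = transitions(left) + transitions(right)
--     # + 1 if the boundary characters differ; then the final '-' check.
--     def trans(s):
--         if len(s) < 2:
--             return 0
--         mid = len(s) // 2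
--         left, right = s[:mid], s[mid:]
--         return trans(left) + trans(right) + (1 if left[-1] != right[0] else 0)
--     return trans(string) + (1 if string[-1] == '-' else 0)
-- ===== Notes on version B (the rewrite author's own statement) =====
-- stated objective: alternative
-- what changed: B counts sign transitions by divide and conquer (split the string at the midpoint, recurse on both halves, add 1 if the boundary characters differ) instead of A's linear index loop over adjacent pairs.
import Mathlib
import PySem

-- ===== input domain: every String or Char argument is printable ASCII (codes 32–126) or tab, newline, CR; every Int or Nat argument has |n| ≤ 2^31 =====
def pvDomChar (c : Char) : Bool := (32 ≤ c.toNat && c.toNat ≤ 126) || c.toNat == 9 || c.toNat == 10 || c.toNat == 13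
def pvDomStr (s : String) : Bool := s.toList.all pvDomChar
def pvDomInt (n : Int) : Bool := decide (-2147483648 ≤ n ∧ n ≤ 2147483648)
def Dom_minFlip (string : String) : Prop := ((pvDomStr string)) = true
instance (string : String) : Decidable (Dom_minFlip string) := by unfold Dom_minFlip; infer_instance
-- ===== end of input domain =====

-- B replaces A's linear index loop by a divide-and-conquer count of adjacent transitions
-- (split at the midpoint, recurse on both halves, +1 if the boundary characters differ).

-- ===== PORT A =====
def minFlip (string : String) : Int :=
  let l := string.toList
  let count : Int :=
    (PySem.List.pyRange 0 ((l.length : Int) - 1) 1).foldl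
      (fun c i =>
        if PySem.List.pyGet? l i ≠ PySem.List.pyGet? l (i + 1) then c + 1 else c) 0
  match PySem.List.pyGet? l (-1) with
  | some ch => if ch = '-' then count + 1 else count
  | none => count  -- Python raises IndexError here (empty string); excluded by Pre_

-- ===== PORT B =====
-- helper 'trans' of Source B; s[:mid] / s[mid:] with 0 ≤ mid ≤ len are exactly take/drop
def pvTransDC (s : List Char) : Int :=
  if s.length < 2 then 0
  else
    let mid := s.length / 2
    let left := s.take mid
    let right := s.drop mid
    pvTransDC left + pvTransDC right +
      (if PySem.List.pyGet? left (-1) ≠ PySem.List.pyGet? right 0 then 1 else 0)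
termination_by s.length
decreasing_by
  · simp only [List.length_take]; omega
  · simp only [List.length_drop]; omega

def minFlip_alt (string : String) : Int :=
  let t := pvTransDC string.toList
  match PySem.List.pyGet? string.toList (-1) with
  | some ch => t + (if ch = '-' then 1 else 0)
  | none => t  -- Python raises IndexError here (empty string); excluded by Pre_

-- ===== PRECONDITION & SPEC =====
-- Both A and B raise IndexError (string[-1]) on the empty string; Pre_ excludes exactly that.
def Pre_minFlip (string : String) : Prop := string ≠ ""
instance (string : String) : Decidable (Pre_minFlip string) := by unfold Pre_minFlip; infer_instance
def pvWitness_minFlip : String := "-+-"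

def Spec_minFlip (string : String) (out : Int) : Prop := out = minFlip_alt string
instance (string : String) (out : Int) : Decidable (Spec_minFlip string out) := by unfold Spec_minFlip; infer_instance

-- ===== CLAIM (what is proved, stated in full; the proofs are below) =====
def Claim_equal_minFlip : Prop := ∀ (string : String), Dom_minFlip string → Pre_minFlip string → Spec_minFlip string (minFlip string)

-- ===== LEMMAS AND PROOFS =====

-- number of adjacent unequal pairs, as a recursion on the list
def pvTrans : List Char → Int
  | a :: b :: t => (if a ≠ b then 1 else 0) + pvTrans (b :: t)
  | _ => 0

-- A's loop computes pvTrans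
theorem pvA_foldl (l : List Char) (c : Int) :
    (PySem.List.pyRange 0 ((l.length : Int) - 1) 1).foldl
      (fun c i =>
        if PySem.List.pyGet? l i ≠ PySem.List.pyGet? l (i + 1) then c + 1 else c) c
      = c + pvTrans l := by
  induction l generalizing c with
  | nil => simp [PySem.List.pyRange_one_eq_nil, pvTrans]
  | cons a t ih =>
    cases t with
    | nil => simp [PySem.List.pyRange_one_eq_nil, pvTrans]
    | cons b t' =>
      have hlen : ((a :: b :: t').length : Int) - 1 = ((b :: t').length : Int) := by
        simp
      rw [hlen]
      have hpos : (0 : Int) < ((b :: t').length : Int) := by simp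
      rw [PySem.List.pyRange_one_cons hpos]
      simp only [List.foldl_cons]
      have hshift :
          PySem.List.pyRange 1 ((b :: t').length : Int) 1
            = (PySem.List.pyRange 0 (((b :: t').length : Int) - 1) 1).map (· + 1) := by
        rw [PySem.List.pyRange_one, PySem.List.pyRange_one]
        simp [List.map_map, Function.comp, Int.add_comm]
      rw [show (0:Int)+1 = 1 from by norm_num, hshift, List.foldl_map]
      have hcongr :
          (PySem.List.pyRange 0 (((b :: t').length : Int) - 1) 1).foldl
            (fun c k =>
              if PySem.List.pyGet? (a :: b :: t') (k + 1)
                  ≠ PySem.List.pyGet? (a :: b :: t') (k + 1 + 1) then c + 1 else c)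
            (if PySem.List.pyGet? (a :: b :: t') 0
                ≠ PySem.List.pyGet? (a :: b :: t') 1 then c + 1 else c)
          = (PySem.List.pyRange 0 (((b :: t').length : Int) - 1) 1).foldl
            (fun c k =>
              if PySem.List.pyGet? (b :: t') k
                  ≠ PySem.List.pyGet? (b :: t') (k + 1) then c + 1 else c)
            (if PySem.List.pyGet? (a :: b :: t') 0
                ≠ PySem.List.pyGet? (a :: b :: t') 1 then c + 1 else c) := by
        apply PySem.List.foldl_congr_mem
        intro acc k hk
        have hk0 : 0 ≤ k := ((PySem.List.mem_pyRange_one).1 hk).1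
        obtain ⟨n, rfl⟩ := Int.eq_ofNat_of_zero_le hk0
        rw [PySem.List.pyGet?_cons_succ]
        have h2 : ((n : Int) + 1 + 1) = (((n + 1 : Nat) : Int) + 1) := by push_cast; ring
        rw [h2, PySem.List.pyGet?_cons_succ]
        push_cast
        rfl
      rw [hcongr, ih]
      have h0 : PySem.List.pyGet? (a :: b :: t') 0 = some a :=
        PySem.List.pyGet?_zero_cons a (b :: t')
      have h1 : PySem.List.pyGet? (a :: b :: t') 1 = some b := by
        have : (1 : Int) = (((0 : Nat) : Int) + 1) := by norm_num
        rw [this, PySem.List.pyGet?_cons_succ]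
        exact PySem.List.pyGet?_zero_cons b t'
      rw [h0, h1]
      show _ = c + pvTrans (a :: b :: t')
      rw [pvTrans]
      by_cases hab : a = b
      · simp [hab]
      · simp only [ne_eq, Option.some.injEq, hab, not_false_eq_true, if_pos]
        ring

-- transitions split at an append boundary
theorem pvTrans_append (l r : List Char) (hl : l ≠ []) (hr : r ≠ []) :
    pvTrans (l ++ r)
      = pvTrans l + pvTrans r + (if l.getLast? ≠ r.head? then 1 else 0) := by
  induction l with
  | nil => exact absurd rfl hl
  | cons a t ih =>
    cases t with
    | nil =>
      cases r with
      | nil => exact absurd rfl hr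
      | cons b r' =>
        simp only [List.cons_append, List.nil_append, pvTrans]
        simp [List.getLast?]
        by_cases hab : a = b
        · simp [hab]
        · simp [hab]; ring
    | cons b t' =>
      have := ih (by simp)
      simp only [List.cons_append] at this ⊢
      rw [pvTrans, this, pvTrans]
      have hlast : (a :: b :: t').getLast? = (b :: t').getLast? := by
        simp [List.getLast?_cons_cons]
      rw [hlast]
      ring

-- the divide-and-conquer helper computes pvTrans
theorem pvTransDC_eq (s : List Char) : pvTransDC s = pvTrans s := by
  induction s using pvTransDC.induct with
  | case1 s h =>
    rw [pvTransDC, if_pos h]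
    match s, h with
    | [], _ => rfl
    | [c], _ => rfl
  | case2 s h mid left right ihl ihr =>
    rw [pvTransDC, if_neg h]
    simp only at ihl ihr ⊢
    have hmid1 : 1 ≤ mid := by
      have : 2 ≤ s.length := by omega
      simp only [mid]; omega
    have hmidlt : mid < s.length := by
      simp only [mid]; omega
    have hllen : left.length = mid := by
      simp only [left, List.length_take]; omega
    have hrlen : right.length = s.length - mid := by
      simp only [right, List.length_drop]
    have hleft : left ≠ [] := by
      intro hc; rw [hc] at hllen; simp at hllen; omega
    have hright : right ≠ [] := by
      intro hc; rw [hc] at hrlen; simp at hrlen; omega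
    have hsplit : s = left ++ right := (List.take_append_drop mid s).symm
    rw [ihl, ihr]
    conv_rhs => rw [hsplit]
    rw [pvTrans_append left right hleft hright]
    have hgl : PySem.List.pyGet? left (-1) = left.getLast? := PySem.List.pyGet?_neg_one left
    have hgr : PySem.List.pyGet? right 0 = right.head? := by
      obtain ⟨c, r', hcr⟩ := List.exists_cons_of_ne_nil hright
      rw [hcr, PySem.List.pyGet?_zero_cons]; rfl
    rw [hgl, hgr]

-- ===== VERDICT (by name: the statement is the Claim_ definition above) =====
theorem minFlip_spec : Claim_equal_minFlip := by
  intro s _ hpre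
  unfold Spec_minFlip minFlip minFlip_alt
  simp only
  rw [pvA_foldl s.toList 0, pvTransDC_eq]
  cases h : PySem.List.pyGet? s.toList (-1) with
  | none => simp
  | some ch =>
    by_cases hc : ch = '-'
    · simp [hc]
    · simp [hc]
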